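-- pv_equiv track=rewrite | github.com/apnamanya/advent_of_code | 2020/day6.py | get_grouped_lines
-- ===== SOURCE A (Python) =====
-- def get_grouped_lines(orig_entries):
-- 	group_entries=[]
-- 	answers_list=[]
-- 	for i in range(len(orig_entries)):
-- 		line=orig_entries[i].strip()
-- 		group_entries.extend(line)
--
-- 		if not line or i== len(orig_entries)-1:
-- 			answers_list.append(sorted(set(list(group_entries))))
--
-- 			group_entries=[]
--
-- 	return answers_list
-- ===== SOURCE B (Python) =====
-- def get_grouped_lines(orig_entries):
-- 	stripped = [line.strip() for line in orig_entries]
-- 	answers_list = []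
-- 	while stripped:
-- 		cut = next((i for i, l in enumerate(stripped) if not l), len(stripped) - 1)
-- 		answers_list.append(sorted(set(''.join(stripped[:cut + 1]))))
-- 		stripped = stripped[cut + 1:]
-- 	return answers_list
-- ===== Notes on version B (the rewrite author's own statement) =====
-- stated objective: alternative
-- what changed: Replaces A's single indexed loop with a running accumulator and inline flushes by a two-phase decomposition: strip all lines once, then repeatedly split off the prefix ending at the first blank stripped line (or the whole remainder) and emit its sorted character set.
import Mathlib
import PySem

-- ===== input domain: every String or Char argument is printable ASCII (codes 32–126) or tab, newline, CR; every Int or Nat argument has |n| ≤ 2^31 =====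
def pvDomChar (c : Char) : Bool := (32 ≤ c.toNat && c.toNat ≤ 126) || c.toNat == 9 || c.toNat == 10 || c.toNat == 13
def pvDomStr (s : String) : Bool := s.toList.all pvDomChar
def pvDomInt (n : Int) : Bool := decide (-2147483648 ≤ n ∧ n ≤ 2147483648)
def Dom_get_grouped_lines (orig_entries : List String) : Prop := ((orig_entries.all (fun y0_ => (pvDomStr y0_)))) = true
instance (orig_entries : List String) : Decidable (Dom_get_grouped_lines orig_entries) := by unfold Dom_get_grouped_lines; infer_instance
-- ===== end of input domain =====

-- B replaces A's single running-accumulator loop with inline flushes by a two-phase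
-- strip-then-split decomposition (repeatedly split off the prefix up to the first blank
-- stripped line, or the whole remainder); objective: alternative decomposition, same cost.

-- ===== PORT A =====
def get_grouped_lines (orig_entries : List String) : List (List String) :=
  let n : Int := orig_entries.length
  let st := (PySem.List.pyRange 0 n 1).foldl
    (fun (st : List String × List (List String)) i =>
      let line := PySem.Str.strip (PySem.List.pyGetD orig_entries i "")
      let group_entries := st.1 ++ line.toList.map (fun c => String.singleton c)
      if line == "" || i == n - 1 then
        ([], st.2 ++ [PySem.List.sorted (PySem.Set.ofList group_entries) (fun x => x) false])
      else
        (group_entries, st.2))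
    ([], [])
  st.2

-- ===== PORT B =====
-- the `while stripped:` loop of Source B: split off the first group at the first blank line
def altGo (stripped : List String) : List (List String) :=
  if h : stripped = [] then []
  else
    let cut := (stripped.findIdx? (fun l => l == "")).getD (stripped.length - 1)
    (PySem.List.sorted
        (PySem.Set.ofList ((stripped.take (cut + 1)).flatMap
          (fun l => l.toList.map (fun c => String.singleton c))))
        (fun x => x) false)
      :: altGo (stripped.drop (cut + 1))
termination_by stripped.length
decreasing_by
  simp only [List.length_drop]
  have : stripped.length ≠ 0 := by simpa [List.length_eq_zero_iff] using h
  omega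

def get_grouped_lines_alt (orig_entries : List String) : List (List String) :=
  altGo (orig_entries.map (fun line => PySem.Str.strip line))

-- ===== PRECONDITION & SPEC =====
def Spec_get_grouped_lines (orig_entries : List String) (out : List (List String)) : Prop := out = get_grouped_lines_alt orig_entries
instance (orig_entries : List String) (out : List (List String)) : Decidable (Spec_get_grouped_lines orig_entries out) := by unfold Spec_get_grouped_lines; infer_instance

-- ===== CLAIM (what is proved, stated in full; the proofs are below) =====
def Claim_equal_get_grouped_lines : Prop := ∀ (orig_entries : List String), Dom_get_grouped_lines orig_entries → Spec_get_grouped_lines orig_entries (get_grouped_lines orig_entries)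

-- ===== LEMMAS AND PROOFS =====

/-- chars of a line, each as a one-character string (Python iterates a str by chars). -/
def pvChars (l : String) : List String := l.toList.map (fun c => String.singleton c)

/-- sorted(set(g)) -/
def pvS (g : List String) : List String :=
  PySem.List.sorted (PySem.Set.ofList g) (fun x => x) false

/-- A's loop re-expressed as structural recursion over the (already stripped) lines,
    carrying the pending group `g`; at the last line the flush always fires. -/
def pvGoA (g : List String) : List String → List (List String)
  | [] => []
  | [l] => [pvS (g ++ pvChars l)]
  | l :: l' :: rest =>
      if l == "" then pvS (g ++ pvChars l) :: pvGoA [] (l' :: rest)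
      else pvGoA (g ++ pvChars l) (l' :: rest)

/-- altGo with a pending prefix prepended to the first group. -/
def pvAltGoP (g : List String) (s : List String) : List (List String) :=
  if s = [] then []
  else
    let cut := (s.findIdx? (fun l => l == "")).getD (s.length - 1)
    pvS (g ++ (s.take (cut + 1)).flatMap (fun l => pvChars l)) :: altGo (s.drop (cut + 1))

lemma altGo_nil : altGo [] = [] := by
  rw [altGo]; simp

lemma pvAltGoP_nil (s : List String) : pvAltGoP [] s = altGo s := by
  cases s with
  | nil => simp [pvAltGoP, altGo]
  | cons l t =>
      rw [altGo]
      simp [pvAltGoP, pvS, pvChars]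

lemma pvGoA_eq (s : List String) : ∀ g, pvGoA g s = pvAltGoP g s := by
  induction s with
  | nil => intro g; simp [pvGoA, pvAltGoP]
  | cons l t ih =>
      intro g
      cases t with
      | nil =>
          simp [pvGoA, pvAltGoP, List.take_succ_cons, altGo_nil, pvChars]
      | cons l' rest =>
          by_cases hl : l = ""
          · subst hl
            have hchars : pvChars "" = [] := rfl
            simp only [pvGoA, beq_self_eq_true, if_pos]
            rw [ih []]
            rw [pvAltGoP_nil]
            simp [pvAltGoP, List.findIdx?_cons, hchars]
          · have hb : (l == "") = false := by simpa using hl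
            simp only [pvGoA, hb, Bool.false_eq_true, if_false]
            rw [ih (g ++ pvChars l)]
            -- relate the cut of l :: t to the cut of t
            have hfind : (l :: l' :: rest).findIdx? (fun x => x == "")
                = ((l' :: rest).findIdx? (fun x => x == "")).map (· + 1) := by
              simp [List.findIdx?_cons, hb]
            have hcut : ((l :: l' :: rest).findIdx? (fun x => x == "")).getD ((l :: l' :: rest).length - 1)
                = (((l' :: rest).findIdx? (fun x => x == "")).getD ((l' :: rest).length - 1)) + 1 := by
              rw [hfind]
              cases hj : (l' :: rest).findIdx? (fun x => x == "") with
              | none => simp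
              | some j => simp
            simp only [pvAltGoP, reduceCtorEq]
            rw [hcut]
            simp [List.take_succ_cons, List.drop_succ_cons, pvChars]

/-- the loop of A, named so the fold lemma can speak about it. -/
def pvStep (orig : List String) (st : List String × List (List String)) (i : Int) :
    List String × List (List String) :=
  let line := PySem.Str.strip (PySem.List.pyGetD orig i "")
  let group_entries := st.1 ++ line.toList.map (fun c => String.singleton c)
  if line == "" || i == (orig.length : Int) - 1 then
    ([], st.2 ++ [PySem.List.sorted (PySem.Set.ofList group_entries) (fun x => x) false])
  else
    (group_entries, st.2)

lemma pvFoldA (orig : List String) :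
    ∀ (d k : Nat) (g : List String) (acc : List (List String)),
      orig.length - k = d → k ≤ orig.length →
      ((PySem.List.pyRange (k : Int) (orig.length : Int) 1).foldl (pvStep orig) (g, acc)).2
        = acc ++ pvGoA g ((orig.drop k).map (fun l => PySem.Str.strip l)) := by
  intro d
  induction d with
  | zero =>
      intro k g acc hd hk
      have hk' : k = orig.length := by omega
      subst hk'
      rw [PySem.List.pyRange_one_eq_nil (by omega)]
      simp [pvGoA]
  | succ d ihd =>
      intro k g acc hd hk
      have hklt : k < orig.length := by omega
      rw [PySem.List.pyRange_one_cons (by exact_mod_cast hklt)]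
      have hget : PySem.List.pyGetD orig (k : Int) "" = orig[k]'hklt := by
        rw [PySem.List.pyGetD_natCast]
        exact List.getD_eq_getElem _ _ hklt
      have hdropk : orig.drop k = orig[k]'hklt :: orig.drop (k + 1) :=
        (List.getElem_cons_drop hklt).symm
      set line := PySem.Str.strip (orig[k]'hklt) with hline
      by_cases hlast : k = orig.length - 1
      · -- last index: the flush fires whatever the line is
        have hkk : k + 1 = orig.length := by omega
        have hdrop1 : orig.drop (k + 1) = [] := by
          rw [hkk]; simp
        have hki : (k : Int) = (orig.length : Int) - 1 := by omega
        simp only [List.foldl_cons, pvStep, hget]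
        rw [show ((k : Int) + 1) = ((k + 1 : Nat) : Int) by push_cast; ring,
          hkk, PySem.List.pyRange_one_eq_nil (by omega)]
        simp [hdropk, hdrop1, pvGoA, pvS, pvChars, hki]
      · have hklt1 : k + 1 ≤ orig.length := by omega
        have hne : ((k : Int) == (orig.length : Int) - 1) = false := by
          have : (k : Int) ≠ (orig.length : Int) - 1 := by omega
          simpa using this
        have hdnonnil : (orig.drop (k + 1)).map (fun l => PySem.Str.strip l) ≠ [] := by
          simp only [ne_eq, List.map_eq_nil_iff, List.drop_eq_nil_iff]
          omega
        obtain ⟨m, ms, hms⟩ : ∃ m ms, (orig.drop (k + 1)).map (fun l => PySem.Str.strip l) = m :: ms := by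
          cases hx : (orig.drop (k + 1)).map (fun l => PySem.Str.strip l) with
          | nil => exact absurd hx hdnonnil
          | cons m ms => exact ⟨m, ms, rfl⟩
        have hcast : ((k : Int) + 1) = ((k + 1 : Nat) : Int) := by push_cast; ring
        by_cases hempty : line = ""
        · have hcond : ((line == "") || ((k : Int) == (orig.length : Int) - 1)) = true := by
            simp [hempty]
          simp only [List.foldl_cons, pvStep, hget, ← hline, hcond, if_pos]
          rw [hcast, ihd (k + 1) [] _ (by omega) hklt1]
          rw [hdropk]
          simp only [List.map_cons, ← hline, hms, pvGoA]
          rw [hempty]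
          simp [pvS, pvChars, List.append_assoc]
        · have hbe : (line == "") = false := by simpa using hempty
          have hcond : ((line == "") || ((k : Int) == (orig.length : Int) - 1)) = false := by
            simp [hbe, hne]
          simp only [List.foldl_cons, pvStep, hget, ← hline, hcond, Bool.false_eq_true, if_false]
          rw [hcast, ihd (k + 1) _ _ (by omega) hklt1]
          rw [hdropk]
          simp only [List.map_cons, ← hline, hms, pvGoA, hbe, Bool.false_eq_true, if_false]
          simp [pvChars]

-- ===== VERDICT (by name: the statement is the Claim_ definition above) =====
theorem get_grouped_lines_spec : Claim_equal_get_grouped_lines := by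
  intro orig _
  unfold Spec_get_grouped_lines
  have h := pvFoldA orig (orig.length) 0 [] [] (by omega) (by omega)
  simp only [Nat.cast_zero, List.drop_zero, List.nil_append] at h
  show ((PySem.List.pyRange 0 (orig.length : Int) 1).foldl (pvStep orig) ([], [])).2
      = altGo (orig.map (fun line => PySem.Str.strip line))
  rw [h, pvGoA_eq, pvAltGoP_nil]
  -- the fold in get_grouped_lines is exactly the fold with pvStep
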